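-- pv_equiv track=rewrite | github.com/riordan34/Python_Course | lab3.py | encodeRightLeftCipher
-- ===== SOURCE A (Python) =====
-- import math, string
--
-- def reverseString(s):
--     return s[::-1]
--
-- def encodeRightLeftCipher(text, rows):
--     encoded = str(rows) #start of encoded string with rows
--     emptySpaces = rows - len(text)%rows #spaces that need to be populated by lowercase
--     i = 0
--     while (i < emptySpaces):
--         i += 1
--         #add from end of lowercases, move left, wrap if need be
--         text += string.ascii_lowercase[(-i%26)]
--     row = 0
--     while (row < rows): #go row by row
--         char = 0
--         substring = '' #temporary string, use for potential reversal
--         while (char < len(text)):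
--             if char%rows == row:
--                 substring += text[char] #add to substring if it belongs in current row
--             char += 1
--         if row%2 != 0: #if it is an odd row, reverse it before adding to encoded
--             substring = reverseString(substring)
--         encoded += substring
--         row += 1
--     return encoded
-- ===== SOURCE B (Python) =====
-- import string
--
-- def encodeRightLeftCipher(text, rows):
--     pieces = [str(rows)]
--     if rows > 0:
--         pad = rows - len(text) % rows
--         padded = text + ''.join(string.ascii_lowercase[-i % 26] for i in range(1, pad + 1))
--         buckets = [[] for _ in range(rows)]
--         for i, ch in enumerate(padded):
--             buckets[i % rows].append(ch)
--         for r, bucket in enumerate(buckets):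
--             if r % 2:
--                 bucket.reverse()
--             pieces.append(''.join(bucket))
--     return ''.join(pieces)
-- ===== Notes on version B (the rewrite author's own statement) =====
-- stated objective: faster
-- what changed: Instead of scanning the whole padded text once per row (testing index % rows each time), B makes a single pass distributing characters into per-row buckets by index mod rows, then reverses the odd buckets and joins.
-- outside the precondition, e.g. on encodeRightLeftCipher('ab', 0): A raises ZeroDivisionError, B returns '0'
import Mathlib
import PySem

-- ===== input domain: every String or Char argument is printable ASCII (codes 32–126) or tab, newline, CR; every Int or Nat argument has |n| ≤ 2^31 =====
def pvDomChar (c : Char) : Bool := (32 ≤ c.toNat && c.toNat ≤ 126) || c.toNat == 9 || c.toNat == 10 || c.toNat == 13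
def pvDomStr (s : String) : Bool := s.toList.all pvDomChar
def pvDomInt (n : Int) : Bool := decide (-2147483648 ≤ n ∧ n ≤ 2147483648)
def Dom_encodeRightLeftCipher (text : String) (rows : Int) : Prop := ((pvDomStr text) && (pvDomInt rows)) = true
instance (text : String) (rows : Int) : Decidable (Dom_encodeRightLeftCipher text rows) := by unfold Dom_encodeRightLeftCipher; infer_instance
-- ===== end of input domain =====

-- B replaces A's per-row rescans of the text by a single pass distributing characters
-- into per-row buckets (objective: faster, asymptotically).

-- string.ascii_lowercase
def pvLower : List Char := "abcdefghijklmnopqrstuvwxyz".toList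

-- ===== PORT A =====
-- while (i < emptySpaces): i += 1; text += string.ascii_lowercase[(-i % 26)]
def pvPadA (t : List Char) (i e : Int) : List Char :=
  if i < e then
    pvPadA (t ++ [PySem.List.pyGetD pvLower (PySem.Int.mod (-(i + 1)) 26) 'a']) (i + 1) e
  else t
termination_by (e - i).toNat
decreasing_by omega

-- reverseString(s) = s[::-1]
def pvReverseString (s : List Char) : List Char :=
  (PySem.List.slice? s none none (-1)).getD []

-- inner while: walk every char index, keep the ones with char % rows == row
def pvRowSub (t : List Char) (rows row : Int) : List Char :=
  (PySem.List.pyRange 0 (PySem.List.len t) 1).foldl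
    (fun sub ch => if PySem.Int.mod ch rows == row then sub ++ [PySem.List.pyGetD t ch ' '] else sub) []

-- outer while (row < rows)
def pvRowLoopA (t : List Char) (rows row : Int) (enc : List Char) : List Char :=
  if row < rows then
    let substring := pvRowSub t rows row
    let substring := if PySem.Int.mod row 2 != 0 then pvReverseString substring else substring
    pvRowLoopA t rows (row + 1) (enc ++ substring)
  else enc
termination_by (rows - row).toNat
decreasing_by omega

def encodeRightLeftCipher (text : String) (rows : Int) : String :=
  let encoded := PySem.Int.toChars rows
  let emptySpaces := rows - PySem.Int.mod (PySem.List.len text.toList) rows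
  let t := pvPadA text.toList 0 emptySpaces
  String.ofList (pvRowLoopA t rows 0 encoded)

-- ===== PORT B =====
def encodeRightLeftCipher_alt (text : String) (rows : Int) : String :=
  let pieces : List (List Char) := [PySem.Int.toChars rows]
  let pieces :=
    if rows > 0 then
      let pad := rows - PySem.Int.mod (PySem.List.len text.toList) rows
      let padded := text.toList ++
        (PySem.List.pyRange 1 (pad + 1) 1).map
          (fun i => PySem.List.pyGetD pvLower (PySem.Int.mod (-i) 26) 'a')
      let buckets := (PySem.List.enumerate padded 0).foldl
        (fun bs p => List.modify bs (PySem.Int.mod p.1 rows).toNat (fun b => b ++ [p.2]))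
        (List.replicate rows.toNat ([] : List Char))
      (PySem.List.enumerate buckets 0).foldl
        (fun ps rb => ps ++ [if PySem.Int.mod rb.1 2 != 0 then rb.2.reverse else rb.2]) pieces
    else pieces
  String.ofList pieces.flatten  -- ''.join(pieces)

-- ===== PRECONDITION & SPEC =====
-- Pre_ excludes only rows = 0, where A raises ZeroDivisionError on len(text) % rows.
def Pre_encodeRightLeftCipher (text : String) (rows : Int) : Prop := rows ≠ 0
instance (text : String) (rows : Int) : Decidable (Pre_encodeRightLeftCipher text rows) := by
  unfold Pre_encodeRightLeftCipher; infer_instance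

def pvWitness_encodeRightLeftCipher : String × Int := ("hello", 3)

def Spec_encodeRightLeftCipher (text : String) (rows : Int) (out : String) : Prop :=
  out = encodeRightLeftCipher_alt text rows
instance (text : String) (rows : Int) (out : String) : Decidable (Spec_encodeRightLeftCipher text rows out) := by
  unfold Spec_encodeRightLeftCipher; infer_instance

-- ===== CLAIM (what is proved, stated in full; the proofs are below) =====
def Claim_equal_encodeRightLeftCipher : Prop := ∀ (text : String) (rows : Int), Dom_encodeRightLeftCipher text rows → Pre_encodeRightLeftCipher text rows → Spec_encodeRightLeftCipher text rows (encodeRightLeftCipher text rows)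

-- ===== LEMMAS AND PROOFS =====

-- the padding loop of A appends lower[-j % 26] for j = i+1 .. e
theorem pvPadA_eq (t : List Char) (i e : Int) :
    pvPadA t i e = t ++ (PySem.List.pyRange (i + 1) (e + 1) 1).map
      (fun j => PySem.List.pyGetD pvLower (PySem.Int.mod (-j) 26) 'a') := by
  rw [pvPadA]
  split
  · next h =>
    rw [pvPadA_eq, PySem.List.pyRange_one_cons (by omega : i + 1 < e + 1)]
    simp
  · next h =>
    rw [PySem.List.pyRange_one_eq_nil (by omega)]
    simp
termination_by (e - i).toNat
decreasing_by omega

-- A's inner while is a filter of the index range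
theorem pvRowSub_eq (t : List Char) (rows row : Int) :
    pvRowSub t rows row =
      ((PySem.List.pyRange 0 (PySem.List.len t) 1).filter
        (fun ch => PySem.Int.mod ch rows == row)).map
        (fun ch => PySem.List.pyGetD t ch ' ') := by
  unfold pvRowSub
  rw [PySem.List.foldl_append_if]
  simp

-- s[::-1] is reverse
theorem pvReverseString_eq (s : List Char) : pvReverseString s = s.reverse := by
  unfold pvReverseString
  rw [PySem.List.slice?_none_none_neg_one]
  rfl

-- one distribution step keeps the number of buckets
theorem pvDist_length (rows : Int) (l : List (Int × Char)) (bs : List (List Char)) :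
    (l.foldl (fun bs p => List.modify bs (PySem.Int.mod p.1 rows).toNat (fun b => b ++ [p.2])) bs).length
      = bs.length := by
  induction l generalizing bs with
  | nil => rfl
  | cons p l ih => simp [List.foldl_cons, ih, List.length_modify]

-- bucket r of the distribution pass collects, in order, the chars whose index ≡ r
theorem pvDist_getD (rows : Int) (hrows : 0 < rows)
    (l : List (Int × Char)) (bs : List (List Char)) (hlen : bs.length = rows.toNat)
    (r : Nat) (hr : r < rows.toNat) :
    (l.foldl (fun bs p => List.modify bs (PySem.Int.mod p.1 rows).toNat (fun b => b ++ [p.2])) bs).getD r []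
      = bs.getD r [] ++ (l.filter (fun p => (PySem.Int.mod p.1 rows).toNat == r)).map (·.2) := by
  induction l generalizing bs with
  | nil => simp
  | cons p l ih =>
    have hk0 : 0 ≤ PySem.Int.mod p.1 rows := PySem.Int.mod_nonneg p.1 hrows
    have hklt' : PySem.Int.mod p.1 rows < rows := PySem.Int.mod_lt p.1 hrows
    have hklt : (PySem.Int.mod p.1 rows).toNat < bs.length := by omega
    simp only [List.foldl_cons]
    rw [ih _ (by rw [List.length_modify]; exact hlen)]
    rw [List.filter_cons]
    by_cases hrk : (PySem.Int.mod p.1 rows).toNat = r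
    · rw [if_pos (by simpa using hrk)]
      subst hrk
      simp [List.getD_eq_getElem?_getD, List.getElem?_eq_getElem hklt]
    · rw [if_neg (by simpa using hrk)]
      simp [List.getD_eq_getElem?_getD, hrk]

-- A's outer loop, unrolled over the remaining rows
theorem pvRowLoopA_eq (t : List Char) (rows row : Int) (enc : List Char) :
    pvRowLoopA t rows row enc = enc ++
      ((PySem.List.pyRange row rows 1).map (fun r =>
        if PySem.Int.mod r 2 != 0 then pvReverseString (pvRowSub t rows r)
        else pvRowSub t rows r)).flatten := by
  rw [pvRowLoopA]
  split
  · next h =>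
    rw [pvRowLoopA_eq, PySem.List.pyRange_one_cons h]
    simp
  · next h =>
    rw [PySem.List.pyRange_one_eq_nil (by omega)]
    simp
termination_by (rows - row).toNat
decreasing_by omega

-- ===== VERDICT (by name: the statement is the Claim_ definition above) =====
-- Bool form of "mod i rows lands in bucket j": Nat equality vs Int equality
theorem pvCond_eq (rows i j : Int) (hrows : 0 < rows) (hj : 0 ≤ j) :
    ((PySem.Int.mod i rows).toNat == j.toNat) = (PySem.Int.mod i rows == j) := by
  have h0 : 0 ≤ PySem.Int.mod i rows := PySem.Int.mod_nonneg i hrows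
  rw [Bool.eq_iff_iff]; simp only [beq_iff_eq]; omega

-- the bucket of row j equals A's substring for row j
theorem pvBucket_eq (t : List Char) (rows j : Int) (hrows : 0 < rows)
    (hj0 : 0 ≤ j) (hj : j < rows) :
    PySem.List.pyGetD
      ((PySem.List.enumerate t 0).foldl
        (fun bs p => List.modify bs (PySem.Int.mod p.1 rows).toNat (fun b => b ++ [p.2]))
        (List.replicate rows.toNat ([] : List Char))) j []
      = pvRowSub t rows j := by
  have hlen : ((PySem.List.enumerate t 0).foldl
      (fun bs p => List.modify bs (PySem.Int.mod p.1 rows).toNat (fun b => b ++ [p.2]))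
      (List.replicate rows.toNat ([] : List Char))).length = rows.toNat := by
    rw [pvDist_length]; simp
  have hjlt : j.toNat < rows.toNat := by omega
  rw [PySem.List.pyGetD_eq_getElem _ [] hj0 (by rw [hlen]; omega),
      ← List.getD_eq_getElem _ [] (by omega),
      pvDist_getD rows hrows _ _ (by simp) j.toNat hjlt]
  rw [PySem.List.enumerate_eq_map_pyRange t ' ']
  rw [List.filter_map]
  have hcond : ∀ i : Int,
      ((fun p : Int × Char => (PySem.Int.mod p.1 rows).toNat == j.toNat) ∘
        (fun j => (j, PySem.List.pyGetD t j ' '))) i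
      = (fun ch => PySem.Int.mod ch rows == j) i := by
    intro i; exact pvCond_eq rows i j hrows hj0
  rw [List.filter_congr (fun i _ => hcond i)]
  rw [pvRowSub_eq]
  simp [List.map_map]

theorem encodeRightLeftCipher_spec : Claim_equal_encodeRightLeftCipher := by
  intro text rows hdom hpre
  unfold Spec_encodeRightLeftCipher encodeRightLeftCipher encodeRightLeftCipher_alt
  by_cases hpos : rows > 0
  · simp only [if_pos hpos]
    rw [pvPadA_eq, pvRowLoopA_eq]
    rw [PySem.List.foldl_append_singleton_eq_map]
    -- name the padded text (both sides build the same list)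
    set t := text.toList ++ (PySem.List.pyRange (0 + 1)
      (rows - PySem.Int.mod (PySem.List.len text.toList) rows + 1) 1).map
      (fun j => PySem.List.pyGetD pvLower (PySem.Int.mod (-j) 26) 'a') with ht
    have hpad : text.toList ++ (PySem.List.pyRange 1
        (rows - PySem.Int.mod (PySem.List.len text.toList) rows + 1) 1).map
        (fun i => PySem.List.pyGetD pvLower (PySem.Int.mod (-i) 26) 'a') = t := by
      rw [ht]; norm_num
    rw [hpad]
    -- name the buckets
    set buckets := (PySem.List.enumerate t 0).foldl
      (fun bs p => List.modify bs (PySem.Int.mod p.1 rows).toNat (fun b => b ++ [p.2]))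
      (List.replicate rows.toNat ([] : List Char)) with hb
    have hblen : buckets.length = rows.toNat := by rw [hb, pvDist_length]; simp
    rw [PySem.List.enumerate_eq_map_pyRange buckets []]
    have hlenb : PySem.List.len buckets = rows := by
      rw [PySem.List.len_eq, hblen]; omega
    rw [hlenb, List.map_map]
    congr 1
    simp only [List.flatten_append, List.flatten_cons, List.flatten_nil, List.append_nil]
    congr 1
    refine congrArg List.flatten (List.map_congr_left ?_)
    intro j hj
    rw [PySem.List.mem_pyRange_one] at hj
    simp only [Function.comp]
    rw [pvBucket_eq t rows j hpos hj.1 hj.2, pvReverseString_eq]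
  · simp only [if_neg hpos]
    rw [pvRowLoopA, if_neg (by omega)]
    simp
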